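-- pv_equiv track=rewrite | github.com/ObviouslyN0tMe/AdventOfCode | puzzle 6/puzzle 6.py | collectGroupanswers
-- ===== SOURCE A (Python) =====
-- def collectGroupanswers(data):
--     group_answer = ""
--     membercount = 0
--     group_answers = {}
--     last_index = len(data) - 1
--     # making sure last groupanswer gets appended
--     if data[last_index] != "":
--         data.append("")
--     for x in data:
--         if x != "":
--             group_answer += x
--             membercount += 1
--         else:
--             group_answer = group_answer.strip()
--             group_answers[group_answer] = membercount
--             group_answer = ""
--             membercount = 0
--     return group_answers
-- ===== SOURCE B (Python) =====
-- def collectGroupanswers(data):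
--     # flush sentinel: same argument mutation as the original
--     if data[-1] != "":
--         data.append("")
--     result = {}
--     start = 0
--     n = len(data)
--     while start < n:
--         # jump straight to the next blank separator, no per-line branching
--         k = data.index("", start)
--         result["".join(data[start:k]).strip()] = k - start
--         start = k + 1
--     return result
-- ===== Notes on version B (the rewrite author's own statement) =====
-- stated objective: alternative
-- what changed: Replaces A's element-by-element scan with a running concatenation+counter accumulator by a separator-search loop: repeatedly jump to the next blank line with list.index, slice the group out and record len via index arithmetic (k - start), with no per-line branching or accumulator at all.
-- outside the precondition, e.g. on collectGroupanswers([]): A raises IndexError, B raises IndexError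
import Mathlib
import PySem

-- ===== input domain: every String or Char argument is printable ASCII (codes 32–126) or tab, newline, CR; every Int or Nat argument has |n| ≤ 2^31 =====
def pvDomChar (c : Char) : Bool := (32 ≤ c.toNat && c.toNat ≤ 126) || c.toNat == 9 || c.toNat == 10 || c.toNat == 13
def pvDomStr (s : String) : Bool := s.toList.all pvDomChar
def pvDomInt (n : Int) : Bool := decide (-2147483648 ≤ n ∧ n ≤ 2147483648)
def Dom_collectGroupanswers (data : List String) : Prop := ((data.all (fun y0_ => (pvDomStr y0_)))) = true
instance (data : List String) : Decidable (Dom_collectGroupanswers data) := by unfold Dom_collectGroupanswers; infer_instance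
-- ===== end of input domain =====

-- B replaces A's per-line scan (running concatenation + member counter) by a
-- separator-search loop: jump to the next blank line with list.index, slice the
-- group out, count by index arithmetic.  Same cost, different algorithmic structure.
-- A mutates its argument (appends ""); B performs the same mutation; the
-- equivalence proved here is about the return value.

-- ===== PORT A =====
-- the loop body of A's for-loop
def stepA (st : String × Int × PySem.Dict String Int) (x : String) :
    String × Int × PySem.Dict String Int :=
  if x ≠ "" then (st.1 ++ x, st.2.1 + 1, st.2.2)
  else ("", 0, st.2.2.insert (PySem.Str.strip st.1) st.2.1)

def collectGroupanswers (data : List String) : List (String × Int) :=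
  let data' := if PySem.List.pyGetD data (PySem.List.len data - 1) "" ≠ "" then data ++ [""] else data
  (data'.foldl stepA ("", 0, PySem.Dict.empty)).2.2.items

-- ===== PORT B =====
-- B's while-loop: 'start' is represented by the remaining suffix data[start:];
-- data.index("", start) becomes index? on the suffix, data[start:k] its take.
-- index? = none is Python's ValueError from .index; under Pre_ the (mutated) list
-- always ends with "", so the loop never reaches that case before rest = [].
def goB (rest : List String) (d : PySem.Dict String Int) : PySem.Dict String Int :=
  match h : PySem.List.index? rest "" with
  | none => d
  | some k =>
      goB (rest.drop (k + 1))
        (d.insert (PySem.Str.strip (PySem.Str.join "" (rest.take k))) (k : Int))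
termination_by rest.length
decreasing_by
  have hm : "" ∈ rest := (PySem.List.index?_isSome_iff rest "").1 (by rw [h]; rfl)
  cases rest with
  | nil => simp at hm
  | cons a t => simp

def collectGroupanswers_alt (data : List String) : List (String × Int) :=
  let data' := if PySem.List.pyGetD data (PySem.List.len data - 1) "" ≠ "" then data ++ [""] else data
  (goB data' PySem.Dict.empty).items

-- ===== PRECONDITION & SPEC =====
-- Pre_ excludes only the empty list, where A's data[-1] raises IndexError.
def Pre_collectGroupanswers (data : List String) : Prop := data ≠ []
instance (data : List String) : Decidable (Pre_collectGroupanswers data) := by unfold Pre_collectGroupanswers; infer_instance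
def pvWitness_collectGroupanswers : List String := ["ab", "", "c"]

def Spec_collectGroupanswers (data : List String) (out : List (String × Int)) : Prop := out = collectGroupanswers_alt data
instance (data : List String) (out : List (String × Int)) : Decidable (Spec_collectGroupanswers data out) := by unfold Spec_collectGroupanswers; infer_instance

-- ===== CLAIM (what is proved, stated in full; the proofs are below) =====
def Claim_equal_collectGroupanswers : Prop := ∀ (data : List String), Dom_collectGroupanswers data → Pre_collectGroupanswers data → Spec_collectGroupanswers data (collectGroupanswers data)

-- ===== LEMMAS AND PROOFS =====

lemma flatten_intersperse_nil (xs : List (List Char)) :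
    (List.intersperse ([]:List Char) xs).flatten = xs.flatten := by
  induction xs with
  | nil => simp
  | cons h t ih => cases t <;> simp_all [List.intersperse]

-- ''.join over a cons
lemma join_cons (x : String) (t : List String) :
    PySem.Str.join "" (x :: t) = x ++ PySem.Str.join "" t := by
  simp [PySem.Str.join, PySem.Chars.join, List.intercalate, flatten_intersperse_nil]

-- A's fold over a blank-free prefix just accumulates the concatenation and the count
lemma foldA_run (pre : List String) (h : "" ∉ pre) (s : String) (m : Int)
    (d : PySem.Dict String Int) :
    pre.foldl stepA (s, m, d) = (s ++ PySem.Str.join "" pre, m + (pre.length : Int), d) := by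
  induction pre generalizing s m with
  | nil => simp [PySem.Str.join, PySem.Chars.join, List.intercalate]
  | cons x t ih =>
    have hx : x ≠ "" := fun hx => h (hx ▸ List.mem_cons_self ..)
    rw [List.foldl_cons, stepA, if_pos (by simp [hx]),
      ih (fun hm => h (List.mem_cons_of_mem _ hm))]
    rw [join_cons]
    simp [String.append_assoc]
    omega

-- main invariant: the dict A's fold produces equals B's separator-search recursion
lemma main_inv (xs : List String) (d : PySem.Dict String Int) :
    (xs.foldl stepA ("", 0, d)).2.2 = goB xs d := by
  induction hn : xs.length using Nat.strong_induction_on generalizing xs d with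
  | _ n ih =>
    cases hidx : PySem.List.index? xs "" with
    | none =>
      have hnm : "" ∉ xs := (PySem.List.index?_eq_none_iff xs "").1 hidx
      rw [goB, hidx]
      rw [foldA_run xs hnm]
    | some k =>
      obtain ⟨pre, suf, hxs, hk, hpre⟩ := (PySem.List.index?_eq_some_iff xs "" k).1 hidx
      subst hxs hk
      have hdrop : (pre ++ "" :: suf).drop (pre.length + 1) = suf := by
        simp [List.drop_append]
      have htake : (pre ++ "" :: suf).take pre.length = pre := by simp
      rw [goB]
      split
      next h => rw [hidx] at h; cases h
      next k h =>
      rw [hidx] at h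
      cases h
      rw [hdrop, htake, List.foldl_append, foldA_run pre hpre, List.foldl_cons, stepA,
        if_neg (by simp)]
      simp only [String.empty_append, Int.zero_add]
      exact ih suf.length (by simp at hn; omega) suf _ rfl

-- ===== VERDICT (by name: the statement is the Claim_ definition above) =====
theorem collectGroupanswers_spec : Claim_equal_collectGroupanswers := by
  intro data _ _
  unfold Spec_collectGroupanswers collectGroupanswers collectGroupanswers_alt
  exact congrArg PySem.Dict.items (main_inv _ PySem.Dict.empty)
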